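-- pv_equiv track=rewrite | github.com/thiswillbeyourgithub/TaguchiGridSearchConverter | TaguchiGridSearchConverted/TaguchiGridSearchConverted.py | convert
-- ===== SOURCE A (Python) =====
-- from typing import Dict, List, Any
--
-- def convert(param_grid: Dict[str, List[Any]]) -> List[Dict[str, Any]]:
--     """
--     Converts a full parameter grid into a reduced set using Taguchi array principles.
--
--     Args:
--         param_grid: Dictionary with parameters names (str) as keys and lists of
--                    parameter settings to try as values.
--
--     Returns:
--         List of dictionaries with reduced parameter combinations to test.
--     """
--     # Get the number of parameters and their levels
--     param_names = list(param_grid.keys())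
--     levels = [len(values) for values in param_grid.values()]
--
--     # Determine the minimum number of experiments needed
--     # Using the maximum number of levels as the base
--     num_experiments = max(levels)
--
--     # Create the reduced parameter combinations
--     reduced_grid = []
--     for i in range(num_experiments):
--         combination = {}
--         for param, values in param_grid.items():
--             # Cycle through values using modulo to ensure we stay within bounds
--             idx = i % len(values)
--             combination[param] = values[idx]
--         reduced_grid.append(combination)
--
--     return reduced_grid
-- ===== SOURCE B (Python) =====
-- from typing import Dict, List, Any
--
-- def convert(param_grid: Dict[str, List[Any]]) -> List[Dict[str, Any]]:
--     """Column-wise rebuild: make each parameter's cycled column, then transpose."""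
--     param_names = list(param_grid.keys())
--     num_experiments = max(len(values) for values in param_grid.values())
--     columns = [[values[i % len(values)] for i in range(num_experiments)]
--                for values in param_grid.values()]
--     return [dict(zip(param_names, row)) for row in zip(*columns)]
-- ===== Notes on version B (the rewrite author's own statement) =====
-- stated objective: alternative
-- what changed: B builds the result column-wise: it first materialises each parameter's cycled column [values[i % len] for i in range(num_experiments)], then transposes with zip(*columns) and zips rows back with the key list, instead of A's single row-by-row nested loop building each dict entry by entry.
import Mathlib
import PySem

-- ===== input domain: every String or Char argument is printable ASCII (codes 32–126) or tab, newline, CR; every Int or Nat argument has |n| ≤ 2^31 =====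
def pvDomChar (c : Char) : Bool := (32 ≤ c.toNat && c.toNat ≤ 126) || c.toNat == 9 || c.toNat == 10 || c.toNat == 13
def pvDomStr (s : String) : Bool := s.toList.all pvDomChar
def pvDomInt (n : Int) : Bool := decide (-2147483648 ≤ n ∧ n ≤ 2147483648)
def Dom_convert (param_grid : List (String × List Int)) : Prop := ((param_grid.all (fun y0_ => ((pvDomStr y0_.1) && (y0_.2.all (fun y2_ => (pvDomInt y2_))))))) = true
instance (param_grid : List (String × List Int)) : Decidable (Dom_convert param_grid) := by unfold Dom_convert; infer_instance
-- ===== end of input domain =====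

-- B rebuilds the reduced grid column-wise (cycled column per parameter, then transpose); equivalence of the RETURN value with A's row-by-row dict loop.

-- ===== PORT A =====
-- values[i % len(values)]; the none branches mark ZeroDivisionError (len = 0), excluded by Pre_convert
def convert (param_grid : List (String × List Int)) : List (List (String × Int)) :=
  let _param_names := param_grid.map Prod.fst
  let levels := param_grid.map (fun values => ((values.2.length : Int)))
  match PySem.List.max? levels (fun x => x) with
  | none => []  -- max([]) raises ValueError; excluded by Pre_convert
  | some num_experiments =>
    (PySem.List.pyRange 0 num_experiments 1).foldl (fun reduced_grid i =>
      let combination :=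
        param_grid.foldl (fun comb pv =>
          match PySem.Int.mod? i ((pv.2.length : Int)) with
          | none => comb  -- i % 0: ZeroDivisionError, excluded by Pre_convert
          | some idx =>
            match PySem.List.pyGet? pv.2 idx with
            | none => comb  -- unreachable: 0 ≤ idx < len
            | some v => comb.insert pv.1 v) PySem.Dict.empty
      reduced_grid ++ [combination.items]) []

-- ===== PORT B =====
-- values[i % len(values)] (shared cell expression of B's column comprehension)
def cellVal (pv : String × List Int) (i : Int) : Int :=
  match PySem.Int.mod? i ((pv.2.length : Int)) with
  | none => 0  -- ZeroDivisionError, excluded by Pre_convert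
  | some idx => (PySem.List.pyGet? pv.2 idx).getD 0

-- zip(*columns): heads of all columns, or none when some column is exhausted
def headsZ : List (List Int) → Option (List Int)
  | [] => some []
  | [] :: _ => none
  | (x :: _) :: rest => (headsZ rest).map (x :: ·)

def zipStarGo : Nat → List (List Int) → List (List Int)
  | 0, _ => []
  | fuel + 1, cols =>
    match headsZ cols with
    | none => []
    | some hs => hs :: zipStarGo fuel (cols.map (fun c => c.tail))

-- zip(*columns): fuel = first column's length bounds the number of rows (zip stops at the shortest)
def zipStar (cols : List (List Int)) : List (List Int) :=
  match cols with
  | [] => []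
  | c :: _ => zipStarGo c.length cols

def convert_alt (param_grid : List (String × List Int)) : List (List (String × Int)) :=
  let param_names := param_grid.map Prod.fst
  match PySem.List.max? (param_grid.map (fun values => ((values.2.length : Int)))) (fun x => x) with
  | none => []  -- max() of an empty generator raises ValueError; excluded by Pre_convert
  | some num_experiments =>
    let columns := param_grid.map (fun pv =>
      (PySem.List.pyRange 0 num_experiments 1).map (fun i => cellVal pv i))
    (zipStar columns).map (fun row =>
      ((param_names.zip row).foldl (fun d p => d.insert p.1 p.2) PySem.Dict.empty).items)

-- ===== PRECONDITION & SPEC =====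
-- Pre_convert excludes exactly the inputs where A raises (empty grid: ValueError from max();
-- a mix of empty and non-empty value lists: ZeroDivisionError from i % 0 — all-empty grids return [] and stay inside),
-- and duplicate keys, which cannot occur in A's input (a Python dict has unique keys).
def Pre_convert (param_grid : List (String × List Int)) : Prop :=
  param_grid ≠ [] ∧
  ((∀ pv ∈ param_grid, pv.2 ≠ []) ∨ (∀ pv ∈ param_grid, pv.2 = [])) ∧
  (param_grid.map Prod.fst).Nodup
instance (param_grid : List (String × List Int)) : Decidable (Pre_convert param_grid) := by unfold Pre_convert; infer_instance

def pvWitness_convert : (List (String × List Int)) := [("a", [1, 2, 3]), ("b", [4, 5])]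

def Spec_convert (param_grid : List (String × List Int)) (out : List (List (String × Int))) : Prop := out = convert_alt param_grid
instance (param_grid : List (String × List Int)) (out : List (List (String × Int))) : Decidable (Spec_convert param_grid out) := by unfold Spec_convert; infer_instance

-- ===== CLAIM (what is proved, stated in full; the proofs are below) =====
def Claim_equal_convert : Prop := ∀ (param_grid : List (String × List Int)), Dom_convert param_grid → Pre_convert param_grid → Spec_convert param_grid (convert param_grid)

-- ===== LEMMAS AND PROOFS =====

lemma headsZ_of_ne_nil (cols : List (List Int)) (h : ∀ c ∈ cols, c ≠ []) :
    headsZ cols = some (cols.map (fun c => c.headD 0)) := by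
  induction cols with
  | nil => rfl
  | cons c rest ih =>
    cases c with
    | nil => exact absurd rfl (h [] (by simp))
    | cons x xs =>
      simp only [headsZ, ih (fun c hc => h c (by simp [hc])), Option.map_some, List.map_cons]
      rfl

lemma zipStarGo_spec : ∀ (m : Nat) (cols : List (List Int)), (∀ c ∈ cols, c.length = m) →
    zipStarGo m cols = (List.range m).map (fun i => cols.map (fun c => c.getD i 0)) := by
  intro m
  induction m with
  | zero => intro cols _; simp [zipStarGo]
  | succ m ih =>
    intro cols h
    have hne : ∀ c ∈ cols, c ≠ [] := by
      intro c hc hc0; have := h c hc; simp [hc0] at this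
    rw [zipStarGo, headsZ_of_ne_nil cols hne,
      ih (cols.map (fun c => c.tail)) (by
        intro c hc
        simp only [List.mem_map] at hc
        obtain ⟨c', hc', rfl⟩ := hc
        have := h c' hc'
        simp [List.length_tail, this]),
      List.range_succ_eq_map]
    simp only [List.map_cons, List.map_map]
    congr 1
    · exact List.map_congr_left (fun c hc => by
        cases c with
        | nil => exact absurd rfl (hne [] hc)
        | cons x xs => rfl)
    · apply List.map_congr_left
      intro i _
      simp only [Function.comp]
      refine List.map_congr_left (fun c hc => ?_)
      cases c with
      | nil => exact absurd rfl (hne [] hc)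
      | cons x xs => rfl

lemma zipStar_spec (m : Nat) (cols : List (List Int)) (hne : cols ≠ [])
    (h : ∀ c ∈ cols, c.length = m) :
    zipStar cols = (List.range m).map (fun i => cols.map (fun c => c.getD i 0)) := by
  cases cols with
  | nil => exact absurd rfl hne
  | cons c rest =>
    have hc : c.length = m := h c (by simp)
    simp only [zipStar, hc]
    exact zipStarGo_spec m (c :: rest) h

-- A's inner dict loop, for a row index i ≥ 0 and all value lists non-empty, appends fresh keys
lemma row_items (g : List (String × List Int)) (i : Int)
    (hvals : ∀ pv ∈ g, pv.2 ≠ []) (hnodup : (g.map Prod.fst).Nodup) :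
    (g.foldl (fun comb pv =>
        match PySem.Int.mod? i ((pv.2.length : Int)) with
        | none => comb
        | some idx =>
          match PySem.List.pyGet? pv.2 idx with
          | none => comb
          | some v => comb.insert pv.1 v) PySem.Dict.empty).items
      = g.map (fun pv => (pv.1, cellVal pv i)) := by
  have hcongr := PySem.List.foldl_congr_mem g
    (fun (comb : PySem.Dict String Int) pv =>
      match PySem.Int.mod? i ((pv.2.length : Int)) with
      | none => comb
      | some idx =>
        match PySem.List.pyGet? pv.2 idx with
        | none => comb
        | some v => comb.insert pv.1 v)
    (fun (comb : PySem.Dict String Int) pv => comb.insert pv.1 (cellVal pv i))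
    PySem.Dict.empty
    (by
      intro comb pv hpv
      have hlen : (0 : Int) < (pv.2.length : Int) := by
        have := hvals pv hpv
        have : 0 < pv.2.length := List.length_pos_of_ne_nil this
        exact_mod_cast this
      have hmod : PySem.Int.mod? i ((pv.2.length : Int)) = some (PySem.Int.mod i ((pv.2.length : Int))) := by
        simp [PySem.Int.mod?, PySem.Int.mod, hvals pv hpv]
      have hget := PySem.List.pyGet?_eq_some_getElem pv.2 (PySem.Int.mod_nonneg i hlen) (PySem.Int.mod_lt i hlen)
      simp [cellVal, hmod, hget])
  rw [hcongr]
  have hfresh := PySem.Dict.items_foldl_insert_fresh g Prod.fst (fun pv => cellVal pv i)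
    PySem.Dict.empty (by intro a _; exact PySem.Dict.contains_empty _) hnodup
  rw [hfresh]
  simp [PySem.Dict.empty]

-- B's dict(zip(names, row)) for nodup fresh keys is the pair list itself
lemma dict_zip_items (l : List (String × Int)) (hnodup : (l.map Prod.fst).Nodup) :
    (l.foldl (fun d p => d.insert p.1 p.2) PySem.Dict.empty).items = l := by
  have hfresh := PySem.Dict.items_foldl_insert_fresh l Prod.fst Prod.snd
    PySem.Dict.empty (by intro a _; exact PySem.Dict.contains_empty _) hnodup
  rw [hfresh]
  simp [PySem.Dict.empty]

-- ===== VERDICT (by name: the statement is the Claim_ definition above) =====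
theorem convert_spec : Claim_equal_convert := by
  intro g _hdom hpre
  obtain ⟨hne, hvals, hnodup⟩ := hpre
  unfold Spec_convert convert convert_alt
  cases hmax : PySem.List.max? (g.map (fun values => ((values.2.length : Int)))) (fun x => x) with
  | none =>
    exact absurd (by simpa using (PySem.List.max?_eq_none_iff _ _).mp hmax) hne
  | some n =>
    simp only [hmax]
    rw [PySem.List.foldl_append_singleton_eq_map
        (f := fun i => (g.foldl (fun comb pv =>
          match PySem.Int.mod? i ((pv.2.length : Int)) with
          | none => comb
          | some idx =>
            match PySem.List.pyGet? pv.2 idx with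
            | none => comb
            | some v => comb.insert pv.1 v) PySem.Dict.empty).items),
      zipStar_spec ((n - 0).toNat)
        (g.map (fun pv => (PySem.List.pyRange 0 n 1).map (fun i => cellVal pv i)))
        (by simpa using hne)
        (by
          intro c hc
          simp only [List.mem_map] at hc
          obtain ⟨pv, _, rfl⟩ := hc
          simp [PySem.List.length_pyRange_one]),
      PySem.List.pyRange_one, List.nil_append, List.map_map, List.map_map]
    apply List.map_congr_left
    intro k hk
    have hk' : k < (n - 0).toNat := List.mem_range.mp hk
    rcases hvals with hvn | hve
    · -- all value lists non-empty
      simp only [Function.comp]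
      rw [row_items g ((0 : Int) + ↑k) hvn hnodup]
      have hrow : (g.map (fun pv =>
              List.map (fun i => cellVal pv i) (List.map (fun k => (0 : Int) + ↑k) (List.range (n - 0).toNat)))).map
            (fun c => c.getD k 0)
          = g.map (fun pv => cellVal pv ((0 : Int) + ↑k)) := by
        rw [List.map_map]
        apply List.map_congr_left
        intro pv _
        simp only [Function.comp, List.map_map]
        exact PySem.List.getD_map_range _ _ _ _ hk'
      rw [hrow, List.zip_map', dict_zip_items]
      rw [List.map_map]
      exact hnodup
    · -- all value lists empty: then n = 0 and there is no row index k
      exfalso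
      obtain ⟨pv, hpv, hn⟩ := List.mem_map.mp (PySem.List.max?_mem hmax)
      have hn' : ((pv.2.length : Int)) = n := hn
      have h0 : pv.2 = [] := hve pv hpv
      rw [h0] at hn'
      simp at hn'
      omega
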